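-- pv_equiv track=rewrite | github.com/loralyn-milcarek/aoc-2025 | solutions/05.py | count_ids_in_ranges
-- ===== SOURCE A (Python) =====
-- def count_ids_in_ranges(id_ranges):
--     """
--     Counts IDs in a list of ranges, ignoring duplicates.
--
--     Arguments:
--         id_ranges: list of tuples with start and end range
--
--     Returns:
--         ID count
--     """
--     sorted_ranges = sorted(id_ranges)
--     id_count = 0
--     end = 0
--     for id_range in sorted_ranges:
--         new_start, new_end = id_range[0], id_range[1]
--         if new_end < end:
--             continue
--         if new_start <= end:
--             new_start = end + 1
--         id_count += new_end - new_start + 1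
--         end = max(end, new_end)
--     return id_count
-- ===== SOURCE B (Python) =====
-- def count_ids_in_ranges(id_ranges):
--     """
--     Counts IDs in a list of ranges, ignoring duplicates.
--
--     Maintains an unordered list of pairwise disjoint, non-adjacent intervals
--     of counted IDs (all >= 1).  Each incoming range is clamped to [max(s,1), e]
--     and inserted by absorbing every stored interval it overlaps or touches
--     into one hull interval; the answer is the total length of the stored
--     intervals.  No sorting and no running end are used.
--     """
--     intervals = []  # pairwise disjoint, non-adjacent, each (a, b) with 1 <= a <= b
--     for s, e in id_ranges:
--         s = max(s, 1)          # IDs below 1 are never counted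
--         if e < s:
--             continue           # empty range
--         keep = []
--         for a, b in intervals:
--             if b + 1 < s or e + 1 < a:
--                 keep.append((a, b))
--             else:
--                 s = min(s, a)
--                 e = max(e, b)
--         keep.append((s, e))
--         intervals = keep
--     return sum(b - a + 1 for a, b in intervals)
-- ===== Notes on version B (the rewrite author's own statement) =====
-- stated objective: alternative
-- what changed: B abandons A's sort-then-sweep entirely: it maintains an unordered list of pairwise disjoint non-adjacent intervals and inserts each clamped range by absorbing every stored interval it overlaps or touches into one hull interval, then sums the stored lengths — no sorting and no running end.
-- intended difference: On lists containing a reversed range (s, e) with 0 <= e <= s-2 whose end is at least every lexicographically earlier end, A adds the negative length e-s+1 and returns an undercount (even a negative total, e.g. -1 on [(3, 1)]), while B counts such empty ranges as 0 IDs, which is the intended count. — e.g. on count_ids_in_ranges([(3, 1)]): A returns -1, B returns 0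
import Mathlib
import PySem

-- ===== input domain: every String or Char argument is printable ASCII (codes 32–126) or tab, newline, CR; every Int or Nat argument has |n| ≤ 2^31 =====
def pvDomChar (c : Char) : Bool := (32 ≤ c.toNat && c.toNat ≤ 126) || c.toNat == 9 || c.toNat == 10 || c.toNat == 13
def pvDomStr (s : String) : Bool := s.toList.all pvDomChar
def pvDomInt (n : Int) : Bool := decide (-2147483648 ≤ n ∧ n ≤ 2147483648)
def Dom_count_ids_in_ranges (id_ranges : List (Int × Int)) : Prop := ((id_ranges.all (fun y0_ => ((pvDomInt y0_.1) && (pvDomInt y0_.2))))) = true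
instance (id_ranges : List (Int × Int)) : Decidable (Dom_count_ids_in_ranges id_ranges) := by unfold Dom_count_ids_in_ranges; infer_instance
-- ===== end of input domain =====

-- B replaces A's sort-then-sweep by a sort-free disjoint-interval structure: each clamped range is
-- inserted by absorbing every overlapping/touching stored interval into one hull, and the stored
-- lengths are summed; an alternative algorithm of similar cost.
-- Intended difference (D_ below): on a reversed range whose end dominates all earlier ends, A adds its
-- negative length e-s+1 (undercounting, possibly below zero) while B counts the empty range as 0 IDs.

-- ===== PORT A =====
-- loop body of A: state = (id_count, end)
def pvStepA (st : Int × Int) (p : Int × Int) : Int × Int :=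
  if p.2 < st.2 then st
  else
    let ns : Int := if p.1 ≤ st.2 then st.2 + 1 else p.1
    (st.1 + (p.2 - ns + 1), max st.2 p.2)

def count_ids_in_ranges (id_ranges : List (Int × Int)) : Int :=
  ((PySem.List.sorted2 id_ranges Prod.fst Prod.snd).foldl pvStepA (0, 0)).1

-- ===== PORT B =====
-- inner loop of B: state = (s, e, keep); a stored interval is kept if separated from [s,e], else absorbed
def pvInsStep (st : Int × Int × List (Int × Int)) (q : Int × Int) : Int × Int × List (Int × Int) :=
  if q.2 + 1 < st.1 ∨ st.2.1 + 1 < q.1 then (st.1, st.2.1, st.2.2 ++ [q])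
  else (min st.1 q.1, max st.2.1 q.2, st.2.2)

-- outer loop of B: clamp the range, skip it if empty, otherwise insert it
def pvOuter (intervals : List (Int × Int)) (p : Int × Int) : List (Int × Int) :=
  let s := max p.1 1
  if p.2 < s then intervals
  else
    let r := intervals.foldl pvInsStep (s, p.2, [])
    r.2.2 ++ [(r.1, r.2.1)]

def count_ids_in_ranges_alt (id_ranges : List (Int × Int)) : Int :=
  ((id_ranges.foldl pvOuter []).map (fun q => q.2 - q.1 + 1)).sum

-- ===== PRECONDITION & SPEC =====
-- On lists containing a reversed range p=(s,e) with 0 ≤ e ≤ s-2 whose end e is ≥ every end occurring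
-- lexicographically earlier, A adds the negative length e-s+1 and returns an undercount (e.g. -1 on
-- [(3,1)]), while B counts such an empty range as 0 IDs, which is the intended count.
def D_count_ids_in_ranges (id_ranges : List (Int × Int)) : Prop :=
  ∃ p ∈ id_ranges, 0 ≤ p.2 ∧ p.2 + 2 ≤ p.1 ∧
    ∀ q ∈ id_ranges, (q.1 < p.1 ∨ (q.1 = p.1 ∧ q.2 < p.2)) → q.2 ≤ p.2
instance (id_ranges : List (Int × Int)) : Decidable (D_count_ids_in_ranges id_ranges) := by
  unfold D_count_ids_in_ranges; infer_instance

def Spec_count_ids_in_ranges (id_ranges : List (Int × Int)) (out : Int) : Prop :=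
  ¬ D_count_ids_in_ranges id_ranges → out = count_ids_in_ranges_alt id_ranges
instance (id_ranges : List (Int × Int)) (out : Int) : Decidable (Spec_count_ids_in_ranges id_ranges out) := by
  unfold Spec_count_ids_in_ranges; infer_instance

def pvDiffWitness_count_ids_in_ranges : (List (Int × Int)) := [(3, 1)]
def pvDiffWitnessOut_count_ids_in_ranges : Int × Int := (-1, 0)

-- ===== CLAIM (what is proved, stated in full; the proofs are below) =====
def Claim_unchanged_count_ids_in_ranges : Prop := ∀ (id_ranges : List (Int × Int)), Dom_count_ids_in_ranges id_ranges → Spec_count_ids_in_ranges id_ranges (count_ids_in_ranges id_ranges)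
def Claim_changed_count_ids_in_ranges : Prop := Dom_count_ids_in_ranges (pvDiffWitness_count_ids_in_ranges) ∧ D_count_ids_in_ranges (pvDiffWitness_count_ids_in_ranges) ∧ count_ids_in_ranges (pvDiffWitness_count_ids_in_ranges) = pvDiffWitnessOut_count_ids_in_ranges.1 ∧ count_ids_in_ranges_alt (pvDiffWitness_count_ids_in_ranges) = pvDiffWitnessOut_count_ids_in_ranges.2 ∧ pvDiffWitnessOut_count_ids_in_ranges.1 ≠ pvDiffWitnessOut_count_ids_in_ranges.2

def Claim_exact_count_ids_in_ranges : Prop := ∀ (id_ranges : List (Int × Int)), Dom_count_ids_in_ranges id_ranges → D_count_ids_in_ranges id_ranges → count_ids_in_ranges id_ranges ≠ count_ids_in_ranges_alt id_ranges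

-- ===== LEMMAS AND PROOFS =====

-- semantic anchor: the set of counted IDs of one range and of a list of ranges
noncomputable def pvCov (p : Int × Int) : Finset Int := Finset.Icc (max p.1 1) p.2
noncomputable def pvU (l : List (Int × Int)) : Finset Int := l.foldr (fun p acc => pvCov p ∪ acc) ∅
-- the set covered by a list of already-clamped intervals
noncomputable def pvUI (l : List (Int × Int)) : Finset Int := l.foldr (fun q acc => Finset.Icc q.1 q.2 ∪ acc) ∅
-- two intervals are disjoint and non-adjacent
def pvSep (x y : Int × Int) : Prop := x.2 + 1 < y.1 ∨ y.2 + 1 < x.1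

theorem pvUI_nil : pvUI [] = (∅ : Finset Int) := rfl

theorem pvUI_single (a b : Int) : pvUI [(a, b)] = Finset.Icc a b := by
  simp [pvUI]

theorem pvU_cons (p : Int × Int) (l : List (Int × Int)) : pvU (p :: l) = pvCov p ∪ pvU l := rfl
theorem pvUI_cons (q : Int × Int) (l : List (Int × Int)) : pvUI (q :: l) = Finset.Icc q.1 q.2 ∪ pvUI l := rfl

theorem pvUI_append (l₁ l₂ : List (Int × Int)) : pvUI (l₁ ++ l₂) = pvUI l₁ ∪ pvUI l₂ := by
  induction l₁ with
  | nil => simp [pvUI]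
  | cons q l ih => simp [pvUI_cons, ih, Finset.union_assoc]

theorem pvU_perm {l₁ l₂ : List (Int × Int)} (h : l₁.Perm l₂) : pvU l₁ = pvU l₂ := by
  induction h with
  | nil => rfl
  | cons x _ ih => simp [pvU_cons, ih]
  | swap x y l => simp [pvU_cons, ← Finset.union_assoc, Finset.union_comm (pvCov y) (pvCov x)]
  | trans _ _ ih₁ ih₂ => exact ih₁.trans ih₂

-- card of a union with an interval lying strictly above a bounded set
theorem pv_card_union (V : Finset Int) (a b : Int) (hab : a ≤ b) (hV : ∀ x ∈ V, x < a) :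
    (((V ∪ Finset.Icc a b).card : Int)) = (V.card : Int) + (b - a + 1) := by
  have hd : Disjoint V (Finset.Icc a b) := by
    rw [Finset.disjoint_left]
    intro x hx hx'
    have := hV x hx
    have := (Finset.mem_Icc.mp hx').1
    omega
  rw [Finset.card_union_of_disjoint hd, Int.card_Icc]
  push_cast
  omega

-- the hull of two touching intervals is their union (as a set of integers)
theorem pv_hull (s e a b : Int) (_hse : s ≤ e) (_hab : a ≤ b) (h₁ : a ≤ e + 1) (h₂ : s ≤ b + 1) :
    Finset.Icc (min s a) (max e b) = Finset.Icc s e ∪ Finset.Icc a b := by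
  ext x
  simp only [Finset.mem_Icc, Finset.mem_union]
  omega

-- an interval separated from two touching intervals is separated from their hull
theorem pv_sep_hull (q : Int × Int) (s e a b : Int) (hq : q.1 ≤ q.2) (_hse : s ≤ e) (_hab : a ≤ b)
    (h₁ : a ≤ e + 1) (h₂ : s ≤ b + 1) (hs₁ : pvSep q (s, e)) (hs₂ : pvSep q (a, b)) :
    pvSep q (min s a, max e b) := by
  unfold pvSep at *
  simp only at *
  omega

-- disjointness of an interval from the union of a list it is separated from
theorem pv_disj_pvUI (q : Int × Int) (l : List (Int × Int)) (h : ∀ r ∈ l, pvSep q r) :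
    Disjoint (Finset.Icc q.1 q.2) (pvUI l) := by
  induction l with
  | nil => simp [pvUI]
  | cons r l ih =>
    rw [pvUI_cons, Finset.disjoint_union_right]
    refine ⟨?_, ih fun r' hr' => h r' (List.mem_cons_of_mem _ hr')⟩
    have hs := h r (List.mem_cons_self ..)
    rw [Finset.disjoint_left]
    intro x hx hx'
    rw [Finset.mem_Icc] at hx hx'
    unfold pvSep at hs
    omega

-- sum of lengths of a separated list of nonempty intervals = card of its union
theorem pv_sum_card (l : List (Int × Int)) (hpw : l.Pairwise pvSep)
    (hne : ∀ q ∈ l, 1 ≤ q.1 ∧ q.1 ≤ q.2) :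
    (l.map (fun q => q.2 - q.1 + 1)).sum = ((pvUI l).card : Int) := by
  induction l with
  | nil => simp [pvUI]
  | cons q l ih =>
    obtain ⟨hhd, hpr⟩ := List.pairwise_cons.mp hpw
    have hd := pv_disj_pvUI q l hhd
    have hq := hne q (List.mem_cons_self ..)
    rw [pvUI_cons, List.map_cons, List.sum_cons,
      ih hpr (fun r hr => hne r (List.mem_cons_of_mem _ hr)),
      Finset.card_union_of_disjoint hd, Int.card_Icc]
    push_cast
    omega

-- invariant of B's inner insertion loop
theorem pv_ins (rest : List (Int × Int)) :
    ∀ (s e : Int) (keep : List (Int × Int)),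
      1 ≤ s → s ≤ e →
      rest.Pairwise pvSep → (∀ q ∈ rest, 1 ≤ q.1 ∧ q.1 ≤ q.2) →
      keep.Pairwise pvSep → (∀ q ∈ keep, 1 ≤ q.1 ∧ q.1 ≤ q.2) →
      (∀ q ∈ keep, pvSep q (s, e)) →
      (∀ q ∈ keep, ∀ r ∈ rest, pvSep q r) →
      1 ≤ (rest.foldl pvInsStep (s, e, keep)).1 ∧
      (rest.foldl pvInsStep (s, e, keep)).1 ≤ (rest.foldl pvInsStep (s, e, keep)).2.1 ∧
      (rest.foldl pvInsStep (s, e, keep)).2.2.Pairwise pvSep ∧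
      (∀ q ∈ (rest.foldl pvInsStep (s, e, keep)).2.2, 1 ≤ q.1 ∧ q.1 ≤ q.2) ∧
      (∀ q ∈ (rest.foldl pvInsStep (s, e, keep)).2.2,
        pvSep q ((rest.foldl pvInsStep (s, e, keep)).1, (rest.foldl pvInsStep (s, e, keep)).2.1)) ∧
      Finset.Icc (rest.foldl pvInsStep (s, e, keep)).1 (rest.foldl pvInsStep (s, e, keep)).2.1 ∪
          pvUI (rest.foldl pvInsStep (s, e, keep)).2.2
        = Finset.Icc s e ∪ pvUI keep ∪ pvUI rest := by
  induction rest with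
  | nil =>
    intro s e keep hs hse _ _ hkpw hkne hksep _
    exact ⟨hs, hse, hkpw, hkne, hksep, by simp [pvUI]⟩
  | cons p rest ih =>
    intro s e keep hs hse hrpw hrne hkpw hkne hksep hkr
    obtain ⟨hphd, hrpw'⟩ := List.pairwise_cons.mp hrpw
    have hp := hrne p (List.mem_cons_self ..)
    simp only [List.foldl_cons]
    by_cases hg : p.2 + 1 < s ∨ e + 1 < p.1
    · -- kept: p is separated from [s,e]
      rw [show pvInsStep (s, e, keep) p = (s, e, keep ++ [p]) by
        simp only [pvInsStep]; rw [if_pos hg]]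
      have res := ih s e (keep ++ [p]) hs hse hrpw'
        (fun q hq => hrne q (List.mem_cons_of_mem _ hq))
        (List.pairwise_append.mpr ⟨hkpw, by simp, by
          intro a ha b hb; rw [List.mem_singleton.mp hb]
          exact hkr a ha p (List.mem_cons_self ..)⟩)
        (by intro q hq; rcases List.mem_append.mp hq with h | h
            · exact hkne q h
            · rw [List.mem_singleton.mp h]; exact hp)
        (by intro q hq; rcases List.mem_append.mp hq with h | h
            · exact hksep q h
            · rw [List.mem_singleton.mp h]; exact hg)
        (by intro q hq r hr; rcases List.mem_append.mp hq with h | h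
            · exact hkr q h r (List.mem_cons_of_mem _ hr)
            · rw [List.mem_singleton.mp h]; exact hphd r hr)
      refine ⟨res.1, res.2.1, res.2.2.1, res.2.2.2.1, res.2.2.2.2.1, ?_⟩
      rw [res.2.2.2.2.2, pvUI_append, pvUI_cons, pvUI_nil, pvUI_cons]
      ext x
      simp only [Finset.mem_union, Finset.notMem_empty, or_false]
      tauto
    · -- absorbed: hull with p
      rw [show pvInsStep (s, e, keep) p = (min s p.1, max e p.2, keep) by
        simp only [pvInsStep]; rw [if_neg hg]]
      rw [not_or, not_lt, not_lt] at hg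
      have hhull := pv_hull s e p.1 p.2 hse hp.2 (by omega) (by omega)
      have res := ih (min s p.1) (max e p.2) keep (by omega) (by omega) hrpw'
        (fun q hq => hrne q (List.mem_cons_of_mem _ hq))
        hkpw hkne
        (fun q hq => pv_sep_hull q s e p.1 p.2 (hkne q hq).2 hse hp.2 (by omega) (by omega)
          (hksep q hq) (hkr q hq p (List.mem_cons_self ..)))
        (fun q hq r hr => hkr q hq r (List.mem_cons_of_mem _ hr))
      refine ⟨res.1, res.2.1, res.2.2.1, res.2.2.2.1, res.2.2.2.2.1, ?_⟩
      rw [res.2.2.2.2.2, hhull, pvUI_cons]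
      ext x
      simp only [Finset.mem_union]
      tauto

-- invariant of B's outer loop
theorem pv_outer (l : List (Int × Int)) :
    ∀ acc, acc.Pairwise pvSep → (∀ q ∈ acc, 1 ≤ q.1 ∧ q.1 ≤ q.2) →
      (l.foldl pvOuter acc).Pairwise pvSep ∧
      (∀ q ∈ l.foldl pvOuter acc, 1 ≤ q.1 ∧ q.1 ≤ q.2) ∧
      pvUI (l.foldl pvOuter acc) = pvUI acc ∪ pvU l := by
  induction l with
  | nil =>
    intro acc hpw hne
    exact ⟨hpw, hne, by simp [pvU]⟩
  | cons p l ih =>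
    intro acc hpw hne
    simp only [List.foldl_cons]
    by_cases hk : p.2 < max p.1 1
    · rw [show pvOuter acc p = acc by simp only [pvOuter]; rw [if_pos hk]]
      have hcov : pvCov p = ∅ := Finset.Icc_eq_empty (by omega)
      obtain ⟨h1, h2, h3⟩ := ih acc hpw hne
      exact ⟨h1, h2, by rw [h3, pvU_cons, hcov]; simp⟩
    · have hres := pv_ins acc (max p.1 1) p.2 [] (by omega) (by omega) hpw hne
        (by simp) (by simp) (by simp) (by simp)
      obtain ⟨r1, r2, r3, r4, r5, r6⟩ := hres
      rw [show pvOuter acc p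
            = (acc.foldl pvInsStep (max p.1 1, p.2, [])).2.2 ++
              [((acc.foldl pvInsStep (max p.1 1, p.2, [])).1,
                (acc.foldl pvInsStep (max p.1 1, p.2, [])).2.1)] by
        simp only [pvOuter]; rw [if_neg hk]]
      have hacc' : ((acc.foldl pvInsStep (max p.1 1, p.2, [])).2.2 ++
          [((acc.foldl pvInsStep (max p.1 1, p.2, [])).1,
            (acc.foldl pvInsStep (max p.1 1, p.2, [])).2.1)]).Pairwise pvSep := by
        refine List.pairwise_append.mpr ⟨r3, by simp, ?_⟩
        intro a ha b hb; rw [List.mem_singleton.mp hb]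
        exact r5 a ha
      have hne' : ∀ q ∈ (acc.foldl pvInsStep (max p.1 1, p.2, [])).2.2 ++
          [((acc.foldl pvInsStep (max p.1 1, p.2, [])).1,
            (acc.foldl pvInsStep (max p.1 1, p.2, [])).2.1)], 1 ≤ q.1 ∧ q.1 ≤ q.2 := by
        intro q hq
        rcases List.mem_append.mp hq with h | h
        · exact r4 q h
        · rw [List.mem_singleton.mp h]; exact ⟨r1, r2⟩
      obtain ⟨h1, h2, h3⟩ := ih _ hacc' hne'
      refine ⟨h1, h2, ?_⟩
      rw [pvUI_nil, Finset.union_empty] at r6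
      rw [h3, pvUI_append, pvUI_single, pvU_cons,
        show pvCov p = Finset.Icc (max p.1 1) p.2 from rfl]
      ext x
      have h6 := Finset.ext_iff.mp r6 x
      simp only [Finset.mem_union] at h6 ⊢
      tauto

-- B computes the cardinality of the covered set
theorem pv_alt_card (L : List (Int × Int)) :
    count_ids_in_ranges_alt L = ((pvU L).card : Int) := by
  obtain ⟨h1, h2, h3⟩ := pv_outer L [] (by simp) (by simp)
  unfold count_ids_in_ranges_alt
  rw [pv_sum_card _ h1 h2, h3]
  simp [pvUI]

-- ===== A-side: the old merge sweep, used only inside the proofs =====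
def pvStepB (st : Int × Option (Int × Int)) (p : Int × Int) : Int × Option (Int × Int) :=
  let s : Int := max p.1 1
  if p.2 < s then st
  else
    match st.2 with
    | none => (st.1, some (s, p.2))
    | some cur =>
      if s ≤ cur.2 + 1 then (st.1, some (cur.1, max cur.2 p.2))
      else (st.1 + (cur.2 - cur.1 + 1), some (s, p.2))

def pvFlushB (st : Int × Option (Int × Int)) : Int :=
  match st.2 with
  | none => st.1
  | some cur => st.1 + (cur.2 - cur.1 + 1)

-- the covered set of the sweep's current interval
noncomputable def pvCurSet : Option (Int × Int) → Finset Int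
  | none => ∅
  | some q => Finset.Icc q.1 q.2

-- invariant of the sweep's state
def pvSwInv (t : Int) (cur : Option (Int × Int)) (V : Finset Int) (l : List (Int × Int)) : Prop :=
  match cur with
  | none => t = 0 ∧ V = ∅
  | some q => 1 ≤ q.1 ∧ q.1 ≤ q.2 ∧ t = (V.card : Int) ∧ (∀ x ∈ V, x < q.1) ∧
      ∀ p ∈ l, q.1 ≤ max p.1 1

-- the sweep computes the cardinality of the covered set of the (sorted) list
theorem pv_sweep_card (l : List (Int × Int)) :
    ∀ (t : Int) (cur : Option (Int × Int)) (V : Finset Int),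
      l.Pairwise (fun a b => a.1 ≤ b.1) →
      pvSwInv t cur V l →
      pvFlushB (l.foldl pvStepB (t, cur)) = ((V ∪ pvCurSet cur ∪ pvU l).card : Int) := by
  induction l with
  | nil =>
    intro t cur V _ hinv
    cases cur with
    | none =>
      obtain ⟨ht, hV⟩ := hinv
      simp [pvFlushB, ht, hV, pvU, pvCurSet]
    | some q =>
      obtain ⟨hq1, hq2, ht, hb, _⟩ := hinv
      simp only [List.foldl_nil, pvFlushB, pvCurSet]
      rw [show pvU ([] : List (Int × Int)) = ∅ from rfl, Finset.union_empty,
        pv_card_union V q.1 q.2 hq2 hb]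
      omega
  | cons p l ih =>
    intro t cur V hpw hinv
    obtain ⟨hhd, hpr⟩ := List.pairwise_cons.mp hpw
    simp only [List.foldl_cons]
    by_cases hk : p.2 < max p.1 1
    · have hcov : pvCov p = ∅ := Finset.Icc_eq_empty (by omega)
      cases cur with
      | none =>
        rw [show pvStepB (t, none) p = (t, none) by
          simp only [pvStepB]; rw [if_pos hk]]
        rw [ih t none V hpr hinv, pvU_cons, hcov]
        simp
      | some q =>
        obtain ⟨hq1, hq2, ht, hb, hst⟩ := hinv
        rw [show pvStepB (t, some q) p = (t, some q) by
          simp only [pvStepB]; rw [if_pos hk]]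
        rw [ih t (some q) V hpr ⟨hq1, hq2, ht, hb,
          fun p' hp' => hst p' (List.mem_cons_of_mem _ hp')⟩, pvU_cons, hcov]
        simp
    · cases cur with
      | none =>
        obtain ⟨ht, hV⟩ := hinv
        rw [show pvStepB (t, none) p = (t, some (max p.1 1, p.2)) by
          simp only [pvStepB]; rw [if_neg hk]]
        rw [ih t (some (max p.1 1, p.2)) V hpr
          ⟨by omega, by omega, by simp [ht, hV], by simp [hV],
            fun p' hp' => by have := hhd p' hp'; omega⟩]
        rw [pvU_cons, show pvCurSet (some (max p.1 1, p.2)) = pvCov p from rfl,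
          show pvCurSet none = (∅ : Finset Int) from rfl]
        congr 2
        ext x; simp only [Finset.mem_union]; tauto
      | some q =>
        obtain ⟨hq1, hq2, ht, hb, hst⟩ := hinv
        have hqs : q.1 ≤ max p.1 1 := hst p (List.mem_cons_self ..)
        by_cases hm : max p.1 1 ≤ q.2 + 1
        · -- merge
          rw [show pvStepB (t, some q) p = (t, some (q.1, max q.2 p.2)) by
            simp only [pvStepB]; rw [if_neg hk, if_pos hm]]
          rw [ih t (some (q.1, max q.2 p.2)) V hpr
            ⟨hq1, by omega, ht, hb,
              fun p' hp' => hst p' (List.mem_cons_of_mem _ hp')⟩]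
          rw [pvU_cons]
          have hhull := pv_hull q.1 q.2 (max p.1 1) p.2 hq2 (by omega) hm (by omega)
          rw [show min q.1 (max p.1 1) = q.1 by omega] at hhull
          rw [show pvCurSet (some (q.1, max q.2 p.2)) = Finset.Icc q.1 (max q.2 p.2) from rfl,
            show pvCurSet (some q) = Finset.Icc q.1 q.2 from rfl, hhull,
            show pvCov p = Finset.Icc (max p.1 1) p.2 from rfl]
          congr 2
          ext x; simp only [Finset.mem_union]; tauto
        · -- flush
          rw [show pvStepB (t, some q) p
              = (t + (q.2 - q.1 + 1), some (max p.1 1, p.2)) by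
            simp only [pvStepB]; rw [if_neg hk, if_neg hm]]
          rw [ih (t + (q.2 - q.1 + 1)) (some (max p.1 1, p.2)) (V ∪ Finset.Icc q.1 q.2) hpr
            ⟨by omega, by omega, by rw [pv_card_union V q.1 q.2 hq2 hb]; omega,
              ?_, fun p' hp' => by have := hhd p' hp'; omega⟩]
          · rw [pvU_cons, show pvCurSet (some (max p.1 1, p.2)) = pvCov p from rfl,
              show pvCurSet (some q) = Finset.Icc q.1 q.2 from rfl]
            congr 2
            ext x; simp only [Finset.mem_union]; tauto
          · intro x hx
            rcases Finset.mem_union.mp hx with h | h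
            · have := hb x h; omega
            · have := (Finset.mem_Icc.mp h).2; omega

-- both ports sort the input the same way; identify Python's tuple sort with sorting by the lex key
theorem pv_sorted2_eq (L : List (Int × Int)) :
    PySem.List.sorted2 L Prod.fst Prod.snd =
      PySem.List.sorted L (fun p => (toLex p : Int ×ₗ Int)) := by
  have h : ∀ a b : Int × Int,
      (decide (a.1 < b.1) || (!decide (b.1 < a.1) && decide (a.2 < b.2)))
        = decide ((toLex a : Int ×ₗ Int) < toLex b) := by
    intro a b
    by_cases h1 : a.1 < b.1 <;> by_cases h2 : b.1 < a.1 <;> by_cases h3 : a.2 < b.2 <;>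
      simp [h1, h2, h3, Prod.Lex.lt_iff] <;> omega
  rw [PySem.List.sorted_eq_foldl_insertBy]
  simp only [PySem.List.sorted2, h, Bool.false_eq_true, if_false]

-- "no bad reversed range along the sweep": m is the running max(0, ends so far)
def pvGood : Int → List (Int × Int) → Prop
  | _, [] => True
  | m, p :: r => (m ≤ p.2 → p.1 ≤ p.2 + 1) ∧ pvGood (max m p.2) r

-- invariant tying A's state (c, m) to the sweep state (t, cur) with rest l still to be processed
def pvInv (c m t : Int) (cur : Option (Int × Int)) (l : List (Int × Int)) : Prop :=
  match cur with
  | none => c = t ∧ (m = 0 ∨ ∀ p ∈ l, m + 1 ≤ p.1)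
  | some q => c = t + (q.2 - q.1 + 1) ∧ 1 ≤ q.1 ∧ q.1 ≤ q.2 ∧ q.2 ≤ m ∧
      (m = q.2 ∨ ∀ p ∈ l, m + 1 ≤ p.1)

theorem pv_sweep_eq (l : List (Int × Int)) :
    ∀ (c m t : Int) (cur : Option (Int × Int)),
      0 ≤ m →
      l.Pairwise (fun a b => a.1 ≤ b.1) →
      pvGood m l →
      pvInv c m t cur l →
      (l.foldl pvStepA (c, m)).1 = pvFlushB (l.foldl pvStepB (t, cur)) := by
  induction l with
  | nil =>
    intro c m t cur _ _ _ hinv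
    cases cur with
    | none => simpa [pvFlushB] using hinv.1
    | some q => simpa [pvFlushB] using hinv.1
  | cons p r ih =>
    rintro c m t cur hm hpw ⟨hgood, hgr⟩ hinv
    obtain ⟨hhd, hpr⟩ := List.pairwise_cons.mp hpw
    simp only [List.foldl_cons]
    cases cur with
    | none =>
      obtain ⟨hct, hrest⟩ := hinv
      have hrest' : m = 0 ∨ ∀ x ∈ r, m + 1 ≤ x.1 :=
        hrest.imp (fun h => h) (fun h x hx => h x (List.mem_cons_of_mem _ hx))
      by_cases hk : p.2 < max p.1 1
      · by_cases ha : p.2 < m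
        · -- both skip
          have hgr' : pvGood m r := by
            have : max m p.2 = m := by omega
            rwa [this] at hgr
          simp only [pvStepA, pvStepB]
          rw [if_pos ha, if_pos hk]
          exact ih c m t none hm hpr hgr' ⟨hct, hrest'⟩
        · -- A processes a phantom range, contribution 0
          have hme : m ≤ p.2 := by omega
          have hs : p.1 ≤ p.2 + 1 := hgood hme
          simp only [pvStepA, pvStepB]
          rw [if_neg ha, if_pos hk]
          have hns : (if p.1 ≤ m then m + 1 else p.1) = max p.1 (m + 1) := by
            split_ifs <;> omega
          rw [hns]
          have hc0 : c + (p.2 - max p.1 (m + 1) + 1) = c := by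
            rcases hrest with h0 | h'
            · omega
            · have := h' p (List.mem_cons_self ..); omega
          rw [hc0]
          refine ih c (max m p.2) t none (by omega) hpr hgr ⟨hct, ?_⟩
          by_cases h0 : max m p.2 = 0
          · exact Or.inl h0
          · right; intro x hx
            have h1 := hhd x hx
            rcases hrest with h2 | h2
            · omega
            · have := h2 p (List.mem_cons_self ..); omega
      · -- the sweep keeps p and starts a new interval
        have ha : ¬ p.2 < m := by
          intro h
          rcases hrest with h0 | hr
          · omega
          · have := hr p (List.mem_cons_self ..); omega
        simp only [pvStepA, pvStepB]
        rw [if_neg ha, if_neg hk]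
        have hns : (if p.1 ≤ m then m + 1 else p.1) = max p.1 1 := by
          rcases hrest with h0 | hr
          · split_ifs <;> omega
          · have := hr p (List.mem_cons_self ..); split_ifs <;> omega
        rw [hns]
        exact ih (c + (p.2 - max p.1 1 + 1)) (max m p.2) t (some (max p.1 1, p.2))
          (by omega) hpr hgr
          ⟨by omega, by omega, by omega, by omega, Or.inl (by omega)⟩
    | some q =>
      obtain ⟨hct, hq1, hq12, hqm, hrest⟩ := hinv
      have hrest' : m = q.2 ∨ ∀ x ∈ r, m + 1 ≤ x.1 :=
        hrest.imp (fun h => h) (fun h x hx => h x (List.mem_cons_of_mem _ hx))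
      have hdisj : m = q.2 ∨ m + 1 ≤ p.1 := by
        rcases hrest with h1 | h2
        · exact Or.inl h1
        · exact Or.inr (h2 p (List.mem_cons_self ..))
      by_cases hk : p.2 < max p.1 1
      · by_cases ha : p.2 < m
        · have hgr' : pvGood m r := by
            have : max m p.2 = m := by omega
            rwa [this] at hgr
          simp only [pvStepA, pvStepB]
          rw [if_pos ha, if_pos hk]
          exact ih c m t (some q) hm hpr hgr' ⟨hct, hq1, hq12, hqm, hrest'⟩
        · have hme : m ≤ p.2 := by omega
          have hs : p.1 ≤ p.2 + 1 := hgood hme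
          simp only [pvStepA, pvStepB]
          rw [if_neg ha, if_pos hk]
          have hns : (if p.1 ≤ m then m + 1 else p.1) = max p.1 (m + 1) := by
            split_ifs <;> omega
          rw [hns]
          have hc0 : c + (p.2 - max p.1 (m + 1) + 1) = c := by
            rcases hdisj with h1 | h2 <;> omega
          rw [hc0]
          refine ih c (max m p.2) t (some q) (by omega) hpr hgr
            ⟨hct, hq1, hq12, by omega, ?_⟩
          by_cases he : max m p.2 = q.2
          · exact Or.inl he
          · right; intro x hx
            have h1 := hhd x hx
            rcases hdisj with h2 | h2 <;> omega
      · by_cases hA : p.2 < m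
        · -- A skips; the kept p lies inside the current interval, the sweep's merge is a no-op
          have hm1 : m = q.2 := by rcases hdisj with h1 | h2 <;> omega
          have hmerge : max p.1 1 ≤ q.2 + 1 := by omega
          have hgr' : pvGood m r := by
            have : max m p.2 = m := by omega
            rwa [this] at hgr
          simp only [pvStepA, pvStepB]
          rw [if_pos hA, if_neg hk, if_pos hmerge]
          have hqq : max q.2 p.2 = q.2 := by omega
          rw [hqq]
          exact ih c m t (some q) hm hpr hgr' ⟨hct, hq1, hq12, hqm, hrest'⟩
        · simp only [pvStepA, pvStepB]
          rw [if_neg hA, if_neg hk]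
          have hns : (if p.1 ≤ m then m + 1 else p.1) = max p.1 (m + 1) := by
            split_ifs <;> omega
          rw [hns]
          by_cases hmerge : max p.1 1 ≤ q.2 + 1
          · -- merge; A's contribution is p.2 - m
            have hm1 : m = q.2 := by rcases hdisj with h1 | h2 <;> omega
            have hns2 : max p.1 (m + 1) = m + 1 := by omega
            rw [if_pos hmerge, hns2]
            have hqq : max q.2 p.2 = p.2 := by omega
            rw [hqq]
            exact ih (c + (p.2 - (m + 1) + 1)) (max m p.2) t (some (q.1, p.2))
              (by omega) hpr hgr
              ⟨by omega, by omega, by omega, by omega, Or.inl (by omega)⟩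
          · -- flush and start a new interval
            have hns2 : max p.1 (m + 1) = p.1 := by
              rcases hdisj with h1 | h2 <;> omega
            rw [if_neg hmerge, hns2]
            exact ih (c + (p.2 - p.1 + 1)) (max m p.2) (t + (q.2 - q.1 + 1))
              (some (max p.1 1, p.2)) (by omega) hpr hgr
              ⟨by omega, by omega, by omega, by omega, Or.inl (by omega)⟩

-- a failure of pvGood along a sorted list exhibits a witness for D_
theorem pv_not_good (l : List (Int × Int)) :
    ∀ m : Int, 0 ≤ m →
      l.Pairwise (fun a b => a.1 < b.1 ∨ (a.1 = b.1 ∧ a.2 ≤ b.2)) →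
      ¬ pvGood m l →
      ∃ p ∈ l, 0 ≤ p.2 ∧ p.2 + 2 ≤ p.1 ∧ m ≤ p.2 ∧
        ∀ q ∈ l, (q.1 < p.1 ∨ (q.1 = p.1 ∧ q.2 < p.2)) → q.2 ≤ p.2 := by
  induction l with
  | nil => intro m _ _ hg; exact absurd trivial hg
  | cons p r ih =>
    intro m hm hpw hg
    obtain ⟨hhd, hpr⟩ := List.pairwise_cons.mp hpw
    by_cases h1 : m ≤ p.2 → p.1 ≤ p.2 + 1
    · have h2 : ¬ pvGood (max m p.2) r := fun h => hg ⟨h1, h⟩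
      obtain ⟨x, hx, hx0, hx2, hxm, hxall⟩ := ih (max m p.2) (by omega) hpr h2
      refine ⟨x, List.mem_cons_of_mem _ hx, hx0, hx2, by omega, ?_⟩
      intro y hy hlt
      rcases List.mem_cons.mp hy with rfl | hy'
      · omega
      · exact hxall y hy' hlt
    · rw [Classical.not_imp, not_le] at h1
      obtain ⟨hme, hps⟩ := h1
      refine ⟨p, List.mem_cons_self .., by omega, by omega, hme, ?_⟩
      intro y hy hlt
      rcases List.mem_cons.mp hy with rfl | hy'
      · omega
      · have := hhd y hy'; omega

-- sortedness facts about the lex-sorted list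
theorem pv_sorted_pw (L : List (Int × Int)) :
    (PySem.List.sorted L (fun p => (toLex p : Int ×ₗ Int))).Pairwise
      (fun a b => a.1 < b.1 ∨ (a.1 = b.1 ∧ a.2 ≤ b.2)) := by
  have := PySem.List.sorted_pairwise (xs := L) (key := fun p => (toLex p : Int ×ₗ Int))
  refine this.imp ?_
  intro a b h
  simpa [Prod.Lex.le_iff] using h

-- the sweep value equals B's value, unconditionally
theorem pv_sweep_eq_alt (L : List (Int × Int)) :
    pvFlushB ((PySem.List.sorted L (fun p => (toLex p : Int ×ₗ Int))).foldl pvStepB (0, none))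
      = count_ids_in_ranges_alt L := by
  have hperm : (PySem.List.sorted L (fun p => (toLex p : Int ×ₗ Int))).Perm L :=
    PySem.List.sorted_perm ..
  have hpw : (PySem.List.sorted L (fun p => (toLex p : Int ×ₗ Int))).Pairwise
      (fun a b : Int × Int => a.1 ≤ b.1) :=
    (pv_sorted_pw L).imp (fun h => by omega)
  rw [pv_sweep_card _ 0 none ∅ hpw ⟨rfl, rfl⟩, pv_alt_card, pvU_perm hperm]
  simp [pvCurSet]

theorem pv_unchanged (L : List (Int × Int)) (hD : ¬ D_count_ids_in_ranges L) :
    count_ids_in_ranges L = count_ids_in_ranges_alt L := by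
  unfold count_ids_in_ranges
  rw [pv_sorted2_eq]
  set sl := PySem.List.sorted L (fun p => (toLex p : Int ×ₗ Int)) with hsl
  have hperm : sl.Perm L := PySem.List.sorted_perm ..
  have hpwlex := pv_sorted_pw L
  have hgood : pvGood 0 sl := by
    by_contra hg
    obtain ⟨p, hp, hp0, hp2, _, hall⟩ := pv_not_good sl 0 le_rfl hpwlex hg
    exact hD ⟨p, hperm.mem_iff.mp hp, hp0, hp2,
      fun q hq hlt => hall q (hperm.mem_iff.mpr hq) hlt⟩
  rw [pv_sweep_eq sl 0 0 0 none le_rfl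
    (hpwlex.imp (fun h => by omega)) hgood ⟨rfl, Or.inl rfl⟩]
  exact pv_sweep_eq_alt L

-- ===== tightness: inside D_ the two ports always differ (A undercounts strictly) =====
def pvCurEnd : Option (Int × Int) → Int
  | none => 0
  | some q => q.2

-- "some bad reversed range is reached with running max m"
def pvBadAt : Int → List (Int × Int) → Prop
  | _, [] => False
  | m, p :: r => (m ≤ p.2 ∧ 0 ≤ p.2 ∧ p.2 + 2 ≤ p.1) ∨ pvBadAt (max m p.2) r

theorem pv_step_le (c m t : Int) (cur : Option (Int × Int)) (p : Int × Int) (d : Int)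
    (hm : 0 ≤ m) (hce : pvCurEnd cur ≤ m) (hc : c + d ≤ pvFlushB (t, cur)) :
    0 ≤ max m p.2 ∧ pvCurEnd (pvStepB (t, cur) p).2 ≤ max m p.2 ∧
      (pvStepA (c, m) p).1 + d ≤ pvFlushB (pvStepB (t, cur) p) ∧
      (pvStepA (c, m) p).2 = max m p.2 := by
  rcases cur with _ | ⟨cs, ce⟩ <;>
    simp only [pvStepA, pvStepB, pvFlushB, pvCurEnd] at hc hce ⊢ <;>
    split_ifs <;>
    refine ⟨by omega, ?_, ?_, by omega⟩ <;>
    first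
      | omega
      | (simp; omega)
      | simp

theorem pv_sweep_le (l : List (Int × Int)) :
    ∀ (c m t : Int) (cur : Option (Int × Int)) (d : Int),
      0 ≤ m → pvCurEnd cur ≤ m → c + d ≤ pvFlushB (t, cur) →
      (l.foldl pvStepA (c, m)).1 + d ≤ pvFlushB (l.foldl pvStepB (t, cur)) := by
  induction l with
  | nil => intro c m t cur d _ _ hc; exact hc
  | cons p r ih =>
    intro c m t cur d hm hce hc
    obtain ⟨h0, h1, h2, h3⟩ := pv_step_le c m t cur p d hm hce hc
    simp only [List.foldl_cons]
    have hA : pvStepA (c, m) p = ((pvStepA (c, m) p).1, max m p.2) := by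
      rw [← h3]
    rw [hA]
    exact ih _ _ _ _ _ h0 h1 h2

theorem pv_sweep_lt (l : List (Int × Int)) :
    ∀ (c m t : Int) (cur : Option (Int × Int)),
      0 ≤ m → pvCurEnd cur ≤ m → c ≤ pvFlushB (t, cur) → pvBadAt m l →
      (l.foldl pvStepA (c, m)).1 + 1 ≤ pvFlushB (l.foldl pvStepB (t, cur)) := by
  induction l with
  | nil => intro c m t cur _ _ _ hbad; exact absurd hbad (by simp [pvBadAt])
  | cons p r ih =>
    intro c m t cur hm hce hc hbad
    simp only [List.foldl_cons]
    rcases hbad with ⟨hme, hp0, hp2⟩ | hbad'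
    · -- the bad range itself: A adds p.2 - p.1 + 1 ≤ -1, the sweep skips it
      have hA : ¬ p.2 < m := by omega
      have hk : p.2 < max p.1 1 := by omega
      simp only [pvStepA, pvStepB]
      rw [if_neg hA, if_pos hk]
      have hns : (if p.1 ≤ m then m + 1 else p.1) = p.1 := by
        split_ifs <;> omega
      rw [hns]
      exact pv_sweep_le r _ (max m p.2) t cur 1 (by omega) (by omega) (by omega)
    · obtain ⟨h0, h1, h2, h3⟩ := pv_step_le c m t cur p 0 hm hce (by omega)
      have hA : pvStepA (c, m) p = ((pvStepA (c, m) p).1, max m p.2) := by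
        rw [← h3]
      rw [hA]
      exact ih _ _ _ _ h0 h1 (by omega : (pvStepA (c, m) p).1 ≤ pvFlushB (pvStepB (t, cur) p)) hbad'

theorem pv_bad_of_D (l : List (Int × Int)) :
    ∀ (m : Int) (p : Int × Int),
      0 ≤ m → m ≤ p.2 → p ∈ l →
      l.Pairwise (fun a b => a.1 < b.1 ∨ (a.1 = b.1 ∧ a.2 ≤ b.2)) →
      0 ≤ p.2 → p.2 + 2 ≤ p.1 →
      (∀ q ∈ l, (q.1 < p.1 ∨ (q.1 = p.1 ∧ q.2 < p.2)) → q.2 ≤ p.2) →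
      pvBadAt m l := by
  induction l with
  | nil => intro m p _ _ hp; exact absurd hp (by simp)
  | cons h r ih =>
    intro m p hm hmp hp hpw hp0 hp2 hall
    obtain ⟨hhd, hpr⟩ := List.pairwise_cons.mp hpw
    by_cases hhp : h = p
    · subst hhp
      exact Or.inl ⟨by omega, hp0, hp2⟩
    · have hpr' : p ∈ r := by
        rcases List.mem_cons.mp hp with rfl | hr
        · exact absurd rfl hhp
        · exact hr
      have hh2 : h.2 ≤ p.2 := by
        rcases hhd p hpr' with hlt | ⟨heq, hle⟩
        · exact hall h (List.mem_cons_self ..) (Or.inl hlt)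
        · exact hle
      refine Or.inr (ih (max m h.2) p (by omega) (by omega) hpr' hpr hp0 hp2 ?_)
      intro q hq hlt
      exact hall q (List.mem_cons_of_mem _ hq) hlt

theorem pv_tight (L : List (Int × Int)) (hD : D_count_ids_in_ranges L) :
    count_ids_in_ranges L ≠ count_ids_in_ranges_alt L := by
  unfold count_ids_in_ranges
  rw [pv_sorted2_eq]
  set sl := PySem.List.sorted L (fun p => (toLex p : Int ×ₗ Int)) with hsl
  have hperm : sl.Perm L := PySem.List.sorted_perm ..
  have hpwlex := pv_sorted_pw L
  obtain ⟨p, hpL, hp0, hp2, hall⟩ := hD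
  have hbad : pvBadAt 0 sl :=
    pv_bad_of_D sl 0 p le_rfl hp0 (hperm.mem_iff.mpr hpL) hpwlex hp0 hp2
      (fun q hq hlt => hall q (hperm.mem_iff.mp hq) hlt)
  have hlt := pv_sweep_lt sl 0 0 0 none le_rfl le_rfl le_rfl hbad
  rw [pv_sweep_eq_alt L] at hlt
  omega

-- ===== VERDICT (by name: the statement is the Claim_ definition above) =====
theorem count_ids_in_ranges_spec : Claim_unchanged_count_ids_in_ranges := by
  intro L _ hD
  exact pv_unchanged L hD

theorem count_ids_in_ranges_changed : Claim_changed_count_ids_in_ranges := by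
  unfold Claim_changed_count_ids_in_ranges; decide

theorem count_ids_in_ranges_tight : Claim_exact_count_ids_in_ranges := by
  intro L _ hD
  exact pv_tight L hD
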